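-- pv_equiv track=rewrite | github.com/zhengsizuo/leetcode-zhs | 企业题/网易算法/2-逆序对距离.py | Solution
-- ===== SOURCE A (Python) =====
-- def Solution(nums):
--     dp = [0]*len(nums)
--     max_num = nums[0]
--     for i in range(1, len(nums)):
--         if nums[i] > max_num:
--             max_num = nums[i]
--             dp[i] = dp[i-1]
--         else:
--             d = 0
--             for j in range(i):
--                 if nums[j] > nums[i]:
--                     d += i-j
--
--             dp[i] = dp[i-1] + d
--
--     return dp[-1]
-- ===== SOURCE B (Python) =====
-- def Solution(nums):
--     # Merge-sort based: count weighted inversions (sum of j-i over pairs i<j with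
--     # nums[i] > nums[j]) in O(n log n) by merging (value, index) pairs.
--     def solve(arr):
--         n = len(arr)
--         if n <= 1:
--             return arr, 0
--         left, sl = solve(arr[:n // 2])
--         right, sr = solve(arr[n // 2:])
--         merged = []
--         total = sl + sr
--         cnt = len(left)
--         ssum = sum(i for _, i in left)
--         li = ri = 0
--         while li < len(left) and ri < len(right):
--             if left[li][0] <= right[ri][0]:
--                 cnt -= 1
--                 ssum -= left[li][1]
--                 merged.append(left[li])
--                 li += 1
--             else:
--                 total += cnt * right[ri][1] - ssum
--                 merged.append(right[ri])
--                 ri += 1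
--         merged.extend(left[li:])
--         merged.extend(right[ri:])
--         return merged, total
--     if not nums:
--         return 0
--     return solve([(v, i) for i, v in enumerate(nums)])[1]
-- ===== Notes on version B (the rewrite author's own statement) =====
-- stated objective: faster
-- what changed: Replaces A's dp array with per-element quadratic back-scan by a divide-and-conquer merge-sort that counts the weighted inversions (sum of j-i over pairs nums[i]>nums[j], i<j) while merging, tracking the count and index-sum of the remaining left run.
import Mathlib
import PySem

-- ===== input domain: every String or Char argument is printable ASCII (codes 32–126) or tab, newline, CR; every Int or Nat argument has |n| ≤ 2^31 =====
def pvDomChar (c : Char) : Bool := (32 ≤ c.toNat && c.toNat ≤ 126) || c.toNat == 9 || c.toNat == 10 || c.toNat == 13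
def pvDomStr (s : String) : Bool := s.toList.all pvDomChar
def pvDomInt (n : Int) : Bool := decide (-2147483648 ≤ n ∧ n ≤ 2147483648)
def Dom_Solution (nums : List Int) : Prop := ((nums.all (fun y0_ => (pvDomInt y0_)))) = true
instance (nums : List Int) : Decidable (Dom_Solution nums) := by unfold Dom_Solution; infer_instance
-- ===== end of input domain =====

-- B replaces A's quadratic per-element back-scan by a merge-sort count of weighted
-- inversions; return values agree on every nonempty list (A raises on []).

-- ===== PORT A =====
-- the body of A's outer for-loop (state = (dp, max_num), i = the loop index)
def pvStepA (nums : List Int) (st : List Int × Int) (i : Int) : List Int × Int :=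
  let ni := PySem.List.pyGetD nums i 0
  if ni > st.2 then
    (PySem.List.pySetD st.1 i (PySem.List.pyGetD st.1 (i - 1) 0), ni)
  else
    let d := (PySem.List.pyRange 0 i 1).foldl (fun d j =>
      if PySem.List.pyGetD nums j 0 > ni then d + (i - j) else d) 0
    (PySem.List.pySetD st.1 i (PySem.List.pyGetD st.1 (i - 1) 0 + d), st.2)

def Solution (nums : List Int) : Int :=
  let n : Int := (nums.length : Int)
  let dp0 : List Int := PySem.List.pyRepeat [(0 : Int)] n
  let mx0 : Int := (PySem.List.pyGet? nums 0).getD 0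
  let st := (PySem.List.pyRange 1 n 1).foldl (pvStepA nums) (dp0, mx0)
  PySem.List.pyGetD st.1 (-1) 0

-- ===== PORT B =====
-- merge step of Source B: cnt/ssum track count and index-sum of the left run's remainder
def pvMergeB : List (Int × Int) → List (Int × Int) → Int → Int → Int → List (Int × Int) × Int
  | [], r, _, _, total => (r, total)
  | x :: l', [], _, _, total => (x :: l', total)
  | x :: l', y :: r', cnt, ssum, total =>
      if x.1 ≤ y.1 then
        let res := pvMergeB l' (y :: r') (cnt - 1) (ssum - x.2) total
        (x :: res.1, res.2)
      else
        let res := pvMergeB (x :: l') r' cnt ssum (total + cnt * y.2 - ssum)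
        (y :: res.1, res.2)

-- fuel = a bound on the list length, only a structural-termination guard
def pvSolveB : Nat → List (Int × Int) → List (Int × Int) × Int
  | 0, arr => (arr, 0)
  | fuel + 1, arr =>
    if arr.length ≤ 1 then (arr, 0)
    else
      let L := pvSolveB fuel (arr.take (arr.length / 2))
      let R := pvSolveB fuel (arr.drop (arr.length / 2))
      pvMergeB L.1 R.1 (L.1.length : Int) ((L.1.map (·.2)).sum) (L.2 + R.2)

def Solution_alt (nums : List Int) : Int :=
  if nums = [] then 0
  else (pvSolveB nums.length ((PySem.List.enumerate nums 0).map (fun p => (p.2, p.1)))).2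

-- ===== PRECONDITION & SPEC =====
-- Pre_ excludes only the empty list, on which A raises IndexError (nums[0]).
def Pre_Solution (nums : List Int) : Prop := nums ≠ []
instance (nums : List Int) : Decidable (Pre_Solution nums) := by unfold Pre_Solution; infer_instance
def pvWitness_Solution : List Int := [3, 1, 2]

def Spec_Solution (nums : List Int) (out : Int) : Prop := out = Solution_alt nums
instance (nums : List Int) (out : Int) : Decidable (Spec_Solution nums out) := by unfold Spec_Solution; infer_instance

-- ===== CLAIM (what is proved, stated in full; the proofs are below) =====
def Claim_equal_Solution : Prop := ∀ (nums : List Int), Dom_Solution nums → Pre_Solution nums → Spec_Solution nums (Solution nums)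

-- ===== LEMMAS AND PROOFS =====

def pvW (p q : Int × Int) : Int :=
  if p.2 < q.2 ∧ q.1 < p.1 then q.2 - p.2
  else if q.2 < p.2 ∧ p.1 < q.1 then p.2 - q.2 else 0

def pvF : List (Int × Int) → Int
  | [] => 0
  | x :: xs => (xs.map (pvW x)).sum + pvF xs

def pvC (l r : List (Int × Int)) : Int := (l.map (fun p => (r.map (pvW p)).sum)).sum

theorem pvC_cons_left (x : Int × Int) (l r : List (Int × Int)) :
    pvC (x :: l) r = (r.map (pvW x)).sum + pvC l r := by
  simp [pvC]

theorem pvC_cons_right (l : List (Int × Int)) (y : Int × Int) (r : List (Int × Int)) :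
    pvC l (y :: r) = (l.map (fun p => pvW p y)).sum + pvC l r := by
  simp [pvC, List.sum_map_add]

theorem pvSumSub (s : List (Int × Int)) (c : Int) :
    (s.map (fun p => c - p.2)).sum = (s.length : Int) * c - (s.map (·.2)).sum := by
  induction s with
  | nil => simp
  | cons a s ih => simp only [List.map_cons, List.sum_cons, List.length_cons, ih]; push_cast; ring

theorem pvMergeB_spec : ∀ (l r : List (Int × Int)) (t : Int),
    l.Pairwise (fun a b => a.1 ≤ b.1) → r.Pairwise (fun a b => a.1 ≤ b.1) →
    (∀ p ∈ l, ∀ q ∈ r, p.2 < q.2) →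
    (pvMergeB l r (l.length : Int) ((l.map (·.2)).sum) t).2 = t + pvC l r ∧
    (pvMergeB l r (l.length : Int) ((l.map (·.2)).sum) t).1.Perm (l ++ r) ∧
    (pvMergeB l r (l.length : Int) ((l.map (·.2)).sum) t).1.Pairwise (fun a b => a.1 ≤ b.1) := by
  intro l
  induction l with
  | nil =>
    intro r t _ hr _
    simp [pvMergeB, pvC]
    exact hr
  | cons x l' ihl =>
    intro r
    induction r with
    | nil =>
      intro t hl _ _
      refine ⟨by simp [pvMergeB, pvC], by simp [pvMergeB], by simpa [pvMergeB] using hl⟩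
    | cons y r' ihr =>
      intro t hl hr hidx
      by_cases hxy : x.1 ≤ y.1
      · -- pop x from left
        have hlen : ((x :: l').length : Int) - 1 = (l'.length : Int) := by
          push_cast [List.length_cons]; ring
        have hsum : ((x :: l').map (·.2)).sum - x.2 = (l'.map (·.2)).sum := by
          simp only [List.map_cons, List.sum_cons]; ring
        have hl' := (List.pairwise_cons.mp hl).2
        have hxle := (List.pairwise_cons.mp hl).1
        have hidx' : ∀ p ∈ l', ∀ q ∈ y :: r', p.2 < q.2 :=
          fun p hp q hq => hidx p (List.mem_cons_of_mem _ hp) q hq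
        obtain ⟨ih2, ihperm, ihsorted⟩ := ihl (y :: r') t hl' hr hidx'
        have heq : pvMergeB (x :: l') (y :: r') ((x :: l').length : Int) (((x :: l').map (·.2)).sum) t =
            ((pvMergeB l' (y :: r') (l'.length : Int) ((l'.map (·.2)).sum) t).1.cons x,
             (pvMergeB l' (y :: r') (l'.length : Int) ((l'.map (·.2)).sum) t).2) := by
          rw [pvMergeB]; simp only [if_pos hxy, hlen, hsum]
        rw [heq]
        -- x beats nothing on the right: y.1 and everything after is ≥ x.1
        have hx0 : ((y :: r').map (pvW x)).sum = 0 := by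
          apply List.sum_eq_zero
          intro z hz
          simp only [List.mem_map] at hz
          obtain ⟨q, hq, rfl⟩ := hz
          have hq1 : y.1 ≤ q.1 := by
            rcases List.mem_cons.mp hq with rfl | hq'
            · exact le_refl _
            · exact (List.pairwise_cons.mp hr).1 q hq'
          have hq2 : x.2 < q.2 := hidx x (List.mem_cons_self) q hq
          unfold pvW
          split_ifs <;> omega
        refine ⟨?_, ?_, ?_⟩
        · rw [ih2, pvC_cons_left, hx0]; ring
        · exact (ihperm.cons x)
        · refine List.pairwise_cons.mpr ⟨?_, ihsorted⟩
          intro z hz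
          have hz2 : z ∈ l' ++ (y :: r') := ihperm.mem_iff.mp hz
          rcases List.mem_append.mp hz2 with h | h
          · exact hxle z h
          · rcases List.mem_cons.mp h with rfl | h'
            · exact hxy
            · exact le_trans hxy ((List.pairwise_cons.mp hr).1 z h')
      · -- pop y from right
        have hyx : y.1 < x.1 := lt_of_not_ge hxy
        have hr' := (List.pairwise_cons.mp hr).2
        have hidx' : ∀ p ∈ x :: l', ∀ q ∈ r', p.2 < q.2 :=
          fun p hp q hq => hidx p hp q (List.mem_cons_of_mem _ hq)
        obtain ⟨ih2, ihperm, ihsorted⟩ := ihr (t + ((x :: l').length : Int) * y.2 - ((x :: l').map (·.2)).sum) hl hr' hidx'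
        have heq : pvMergeB (x :: l') (y :: r') ((x :: l').length : Int) (((x :: l').map (·.2)).sum) t =
            ((pvMergeB (x :: l') r' ((x :: l').length : Int) (((x :: l').map (·.2)).sum)
                (t + ((x :: l').length : Int) * y.2 - ((x :: l').map (·.2)).sum)).1.cons y,
             (pvMergeB (x :: l') r' ((x :: l').length : Int) (((x :: l').map (·.2)).sum)
                (t + ((x :: l').length : Int) * y.2 - ((x :: l').map (·.2)).sum)).2) := by
          rw [pvMergeB]; simp only [if_neg hxy]
        rw [heq]
        -- every remaining left element beats y
        have hwin : ((x :: l').map (fun p => pvW p y)).sum =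
            ((x :: l').length : Int) * y.2 - ((x :: l').map (·.2)).sum := by
          have hval : ∀ p ∈ x :: l', pvW p y = y.2 - p.2 := by
            intro p hp
            have hp1 : x.1 ≤ p.1 := by
              rcases List.mem_cons.mp hp with rfl | hp'
              · exact le_refl _
              · exact (List.pairwise_cons.mp hl).1 p hp'
            have hp2 : p.2 < y.2 := hidx p hp y (List.mem_cons_self)
            unfold pvW
            split_ifs <;> omega
          rw [List.map_congr_left hval, pvSumSub]
        refine ⟨?_, ?_, ?_⟩
        · rw [ih2, pvC_cons_right, hwin]; ring
        · exact (ihperm.cons y).trans (List.Perm.symm (List.perm_middle))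
        · refine List.pairwise_cons.mpr ⟨?_, ihsorted⟩
          intro z hz
          have hz2 : z ∈ (x :: l') ++ r' := ihperm.mem_iff.mp hz
          rcases List.mem_append.mp hz2 with h | h
          · rcases List.mem_cons.mp h with rfl | h'
            · exact le_of_lt hyx
            · exact le_trans (le_of_lt hyx) ((List.pairwise_cons.mp hl).1 z h')
          · exact (List.pairwise_cons.mp hr).1 z h

theorem pvF_append (l r : List (Int × Int)) : pvF (l ++ r) = pvF l + pvF r + pvC l r := by
  induction l with
  | nil => simp [pvF, pvC]
  | cons x l ih => simp [pvF, pvC, ih]; ring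

theorem pvC_perm {l l' r r' : List (Int × Int)} (hl : l.Perm l') (hr : r.Perm r') :
    pvC l r = pvC l' r' := by
  unfold pvC
  have h1 : ∀ p, (r.map (pvW p)).sum = (r'.map (pvW p)).sum := fun p => (hr.map _).sum_eq
  calc (l.map (fun p => (r.map (pvW p)).sum)).sum
      = (l.map (fun p => (r'.map (pvW p)).sum)).sum := by
        rw [List.map_congr_left (fun p _ => h1 p)]
    _ = (l'.map (fun p => (r'.map (pvW p)).sum)).sum := (hl.map _).sum_eq

theorem pvSolveB_spec : ∀ (fuel : Nat) (arr : List (Int × Int)), arr.length ≤ fuel →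
    arr.Pairwise (fun a b => a.2 < b.2) →
    (pvSolveB fuel arr).2 = pvF arr ∧ (pvSolveB fuel arr).1.Perm arr ∧
    (pvSolveB fuel arr).1.Pairwise (fun a b => a.1 ≤ b.1) := by
  intro fuel
  induction fuel with
  | zero =>
    intro arr hlen _
    have : arr = [] := List.length_eq_zero_iff.mp (by omega)
    subst this
    exact ⟨rfl, List.Perm.refl _, List.Pairwise.nil⟩
  | succ fuel ihfuel =>
    intro arr hlen hpw
    by_cases h : arr.length ≤ 1
    · rw [pvSolveB, if_pos h]
      match arr, h with
      | [], _ => exact ⟨rfl, List.Perm.refl _, List.Pairwise.nil⟩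
      | [a], _ => exact ⟨by simp [pvF], List.Perm.refl _, by simp⟩
    · have ihL := fun hp => ihfuel (arr.take (arr.length / 2)) (by simp [List.length_take]; omega) hp
      have ihR := fun hp => ihfuel (arr.drop (arr.length / 2)) (by simp [List.length_drop]; omega) hp
      have hsplit : arr = arr.take (arr.length / 2) ++ arr.drop (arr.length / 2) :=
        (List.take_append_drop _ _).symm
      have hpwL : (arr.take (arr.length / 2)).Pairwise (fun a b => a.2 < b.2) :=
        hpw.sublist (List.take_sublist _ _)
      have hpwR : (arr.drop (arr.length / 2)).Pairwise (fun a b => a.2 < b.2) :=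
        hpw.sublist (List.drop_sublist _ _)
      obtain ⟨ihL2, ihLperm, ihLsorted⟩ := ihL hpwL
      obtain ⟨ihR2, ihRperm, ihRsorted⟩ := ihR hpwR
      have hcross : ∀ p ∈ (pvSolveB fuel (arr.take (arr.length / 2))).1,
          ∀ q ∈ (pvSolveB fuel (arr.drop (arr.length / 2))).1, p.2 < q.2 := by
        intro p hp q hq
        have hp' := ihLperm.mem_iff.mp hp
        have hq' := ihRperm.mem_iff.mp hq
        have := (List.pairwise_append.mp (hsplit ▸ hpw)).2.2
        exact this p hp' q hq'
      obtain ⟨m2, mperm, msorted⟩ := pvMergeB_spec _ _ ((pvSolveB fuel (arr.take (arr.length / 2))).2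
          + (pvSolveB fuel (arr.drop (arr.length / 2))).2) ihLsorted ihRsorted hcross
      rw [pvSolveB, if_neg h]
      simp only
      refine ⟨?_, ?_, msorted⟩
      · rw [m2, ihL2, ihR2]
        have : pvC (pvSolveB fuel (arr.take (arr.length / 2))).1 (pvSolveB fuel (arr.drop (arr.length / 2))).1
            = pvC (arr.take (arr.length / 2)) (arr.drop (arr.length / 2)) :=
          pvC_perm ihLperm ihRperm
        rw [this]
        conv_lhs => rw [← pvF_append]
        rw [← hsplit]
      · exact mperm.trans (List.Perm.append ihLperm ihRperm) |>.trans (by rw [← hsplit])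

def pvPairs (nums : List Int) (m : Nat) : List (Int × Int) :=
  (List.range m).map (fun j => (nums.getD j 0, (j : Int)))

-- pvH nums m = weighted inversion sum of the first m elements
def pvH (nums : List Int) : Nat → Int
  | 0 => 0
  | m + 1 => pvH nums m +
      ((List.range m).map (fun j =>
        if nums.getD m 0 < nums.getD j 0 then (m : Int) - (j : Int) else 0)).sum

theorem pvH_succ (nums : List Int) (m : Nat) : pvH nums (m + 1) = pvH nums m +
    ((List.range m).map (fun j =>
      if nums.getD m 0 < nums.getD j 0 then (m : Int) - (j : Int) else 0)).sum := rfl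

theorem pvPairs_succ (nums : List Int) (m : Nat) :
    pvPairs nums (m + 1) = pvPairs nums m ++ [(nums.getD m 0, (m : Int))] := by
  simp [pvPairs, List.range_succ]

theorem pvF_pairs (nums : List Int) (m : Nat) : pvF (pvPairs nums m) = pvH nums m := by
  induction m with
  | zero => rfl
  | succ m ih =>
    rw [pvPairs_succ, pvF_append, ih]
    have h1 : pvF [(nums.getD m 0, (m : Int))] = 0 := by simp [pvF]
    have h2 : pvC (pvPairs nums m) [(nums.getD m 0, (m : Int))] =
        ((List.range m).map (fun j =>
          if nums.getD m 0 < nums.getD j 0 then (m : Int) - (j : Int) else 0)).sum := by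
      unfold pvC pvPairs
      rw [List.map_map]
      congr 1
      apply List.map_congr_left
      intro j hj
      have hjm : j < m := List.mem_range.mp hj
      simp only [Function.comp_apply, List.map_cons, List.map_nil, List.sum_cons, List.sum_nil]
      unfold pvW
      have : (j : Int) < (m : Int) := by exact_mod_cast hjm
      split_ifs <;> simp_all <;> omega
    rw [h1, h2, pvH]
    ring

theorem pvEnumMap (nums : List Int) : ∀ (s : Int),
    (PySem.List.enumerate nums s).map (fun p => (p.2, p.1)) =
      (List.range nums.length).map (fun j => (nums.getD j 0, s + (j : Int))) := by
  induction nums with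
  | nil => intro s; simp [PySem.List.enumerate_nil]
  | cons x xs ih =>
    intro s
    rw [PySem.List.enumerate_cons]
    simp only [List.map_cons, List.length_cons, List.range_succ_eq_map, List.map_map]
    rw [ih (s + 1)]
    refine congrArg₂ _ (by simp) ?_
    apply List.map_congr_left
    intro j _
    simp only [Function.comp_apply, List.getD_cons_succ]
    congr 1
    push_cast; ring

theorem pvPairs_pairwise (nums : List Int) (m : Nat) :
    (pvPairs nums m).Pairwise (fun a b => a.2 < b.2) := by
  unfold pvPairs
  rw [List.pairwise_map]
  refine List.Pairwise.imp ?_ List.pairwise_lt_range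
  intro a b hab
  simpa using (by exact_mod_cast hab : (a : Int) < (b : Int))

theorem B_eval (nums : List Int) (h : nums ≠ []) :
    Solution_alt nums = pvH nums nums.length := by
  unfold Solution_alt
  rw [if_neg h]
  have harg : (PySem.List.enumerate nums 0).map (fun p => (p.2, p.1)) = pvPairs nums nums.length := by
    rw [pvEnumMap nums 0]
    unfold pvPairs
    exact List.map_congr_left (fun j _ => by simp)
  have hlen : (pvPairs nums nums.length).length ≤ nums.length := by simp [pvPairs]
  rw [harg, (pvSolveB_spec nums.length _ hlen (pvPairs_pairwise nums nums.length)).1, pvF_pairs]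

def pvDp (nums : List Int) (m : Nat) : List Int :=
  (List.range nums.length).map (fun k => if k < m then pvH nums (k + 1) else 0)

theorem pvDp_set (nums : List Int) (m : Nat) (hm : m < nums.length) :
    (pvDp nums m).set m (pvH nums (m + 1)) = pvDp nums (m + 1) := by
  apply List.ext_getElem
  · simp [pvDp]
  · intro k h1 h2
    simp only [pvDp, List.length_set, List.length_map, List.length_range] at *
    rw [List.getElem_set]
    by_cases hk : m = k
    · subst hk; simp
    · simp only [if_neg hk, List.getElem_map, List.getElem_range]
      have : k < m ↔ k < m + 1 := by omega
      simp [this]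

theorem pvDp_getD (nums : List Int) (m k : Nat) (hk : k < nums.length) :
    (pvDp nums m).getD k 0 = if k < m then pvH nums (k + 1) else 0 := by
  unfold pvDp
  rw [List.getD_eq_getElem?_getD, List.getElem?_map]
  simp [List.getElem?_range, hk]

theorem A_loop (nums : List Int) (h : nums ≠ []) : ∀ (m : Nat), 1 ≤ m → m ≤ nums.length →
    ∃ mx, (PySem.List.pyRange 1 (m : Int) 1).foldl (pvStepA nums)
        (PySem.List.pyRepeat [(0 : Int)] (nums.length : Int), (PySem.List.pyGet? nums 0).getD 0)
        = (pvDp nums m, mx) ∧ ∀ j < m, nums.getD j 0 ≤ mx := by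
  intro m
  induction m with
  | zero => omega
  | succ m ih =>
    intro _ hle
    by_cases hm1 : m = 0
    · -- base case m+1 = 1: empty range
      subst hm1
      refine ⟨nums.getD 0 0, ?_, ?_⟩
      · rw [PySem.List.pyRange_one_eq_nil (by norm_num)]
        simp only [List.foldl_nil]
        rw [Prod.mk.injEq]
        refine ⟨?_, ?_⟩
        · rw [PySem.List.pyRepeat_singleton]
          apply List.ext_getElem
          · simp [pvDp]
          · intro k h1 h2
            simp only [pvDp, List.getElem_replicate, List.getElem_map, List.getElem_range]
            by_cases hk : k = 0
            · subst hk; simp [pvH]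
            · simp [hk]
        · rw [PySem.List.pyGet?_zero]
          exact List.getD_eq_getElem?_getD.symm
      · intro j hj
        interval_cases j
        exact le_rfl
    · -- inductive step
      have hm : 1 ≤ m := by omega
      have hmn : m ≤ nums.length := by omega
      have hmlt : m < nums.length := by omega
      obtain ⟨mx, hfold, hmax⟩ := ih hm hmn
      have hrange : PySem.List.pyRange 1 ((m + 1 : Nat) : Int) 1 =
          PySem.List.pyRange 1 (m : Int) 1 ++ [(m : Int)] := by
        rw [show ((m + 1 : Nat) : Int) = (m : Int) + 1 from by push_cast; ring]
        exact PySem.List.pyRange_one_succ_right (a := 1) (b := (m : Int)) (by exact_mod_cast hm)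
      rw [hrange, List.foldl_append, hfold, List.foldl_cons, List.foldl_nil]
      have hni : PySem.List.pyGetD nums (m : Int) 0 = nums.getD m 0 := by
        simp [PySem.List.pyGetD_natCast]
      have hprev : PySem.List.pyGetD (pvDp nums m) ((m : Int) - 1) 0 = pvH nums m := by
        have : ((m : Int) - 1) = ((m - 1 : Nat) : Int) := by omega
        rw [this]
        simp only [PySem.List.pyGetD_natCast]
        rw [pvDp_getD nums m (m - 1) (by omega)]
        have h1 : m - 1 < m := by omega
        have h2 : m - 1 + 1 = m := by omega
        rw [if_pos h1, h2]
      by_cases hgt : nums.getD m 0 > mx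
      · -- new maximum: dp[m] = dp[m-1]
        refine ⟨nums.getD m 0, ?_, ?_⟩
        · unfold pvStepA
          rw [hni, if_pos hgt, hprev]
          simp only [PySem.List.pySetD_natCast]
          have hsum0 : pvH nums (m + 1) = pvH nums m := by
            rw [pvH]
            have : ((List.range m).map (fun j =>
                if nums.getD m 0 < nums.getD j 0 then (m : Int) - (j : Int) else 0)).sum = 0 := by
              apply List.sum_eq_zero
              intro z hz
              simp only [List.mem_map, List.mem_range] at hz
              obtain ⟨j, hj, rfl⟩ := hz
              have := hmax j hj
              rw [if_neg (by omega)]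
            rw [this]; ring
          rw [← hsum0, pvDp_set nums m hmlt]
        · intro j hj
          rcases Nat.lt_succ_iff_lt_or_eq.mp hj with hj' | rfl
          · exact le_trans (hmax j hj') (le_of_lt hgt)
          · exact le_refl _
      · -- no new maximum: dp[m] = dp[m-1] + d
        refine ⟨mx, ?_, ?_⟩
        · unfold pvStepA
          rw [hni, if_neg hgt, hprev]
          simp only [PySem.List.pySetD_natCast]
          have hd : (PySem.List.pyRange 0 (m : Int) 1).foldl (fun d j =>
              if PySem.List.pyGetD nums j 0 > nums.getD m 0 then d + ((m : Int) - j) else d) 0 =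
              ((List.range m).map (fun j =>
                if nums.getD m 0 < nums.getD j 0 then (m : Int) - (j : Int) else 0)).sum := by
            have h1 : ∀ (d : Int) (j : Int), j ∈ PySem.List.pyRange 0 (m : Int) 1 →
                (if PySem.List.pyGetD nums j 0 > nums.getD m 0 then d + ((m : Int) - j) else d)
                = d + (if nums.getD m 0 < PySem.List.pyGetD nums j 0 then (m : Int) - j else 0) := by
              intro d j _
              split_ifs <;> ring
            rw [PySem.List.foldl_congr_mem _ _
              (fun d j => d + if nums.getD m 0 < PySem.List.pyGetD nums j 0 then (m : Int) - j else 0)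
              _ h1, PySem.List.foldl_add, PySem.List.pyRange_zero_natCast, List.map_map]
            have h2 : (List.range m).map ((fun j =>
                  if nums.getD m 0 < PySem.List.pyGetD nums j 0 then (m : Int) - j else 0) ∘
                  (fun (k : Nat) => (k : Int))) =
                (List.range m).map (fun j =>
                  if nums.getD m 0 < nums.getD j 0 then (m : Int) - (j : Int) else 0) := by
              apply List.map_congr_left
              intro j _
              simp [PySem.List.pyGetD_natCast]
            rw [h2]
            ring
          rw [hd, ← pvH_succ, pvDp_set nums m hmlt]
        · intro j hj
          rcases Nat.lt_succ_iff_lt_or_eq.mp hj with hj' | rfl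
          · exact hmax j hj'
          · omega

theorem A_eval (nums : List Int) (h : nums ≠ []) :
    Solution nums = pvH nums nums.length := by
  have hn : 1 ≤ nums.length := List.length_pos_iff.mpr h
  obtain ⟨mx, hfold, _⟩ := A_loop nums h nums.length hn (le_refl _)
  unfold Solution
  simp only
  rw [hfold]
  unfold PySem.List.pyGetD
  rw [PySem.List.pyGet?_neg_one]
  rw [List.getLast?_eq_getElem?]
  have hlen : (pvDp nums nums.length).length = nums.length := by simp [pvDp]
  rw [hlen]
  have : (pvDp nums nums.length)[nums.length - 1]? = some (pvH nums nums.length) := by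
    unfold pvDp
    rw [List.getElem?_map]
    have h1 : (List.range nums.length)[nums.length - 1]? = some (nums.length - 1) := by
      exact List.getElem?_range (by omega)
    rw [h1]
    simp only [Option.map_some]
    congr 1
    rw [if_pos (by omega)]
    congr 1
    omega
  rw [this]
  rfl

-- ===== VERDICT (by name: the statement is the Claim_ definition above) =====
theorem Solution_spec : Claim_equal_Solution := by
  intro nums _ hpre
  unfold Spec_Solution
  rw [A_eval nums hpre, B_eval nums hpre]
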